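-- pv_equiv track=rewrite | github.com/Andretwu/Community-Detection | Louvain.py | new_Partition
-- ===== SOURCE A (Python) =====
-- from collections import defaultdict
--
-- def new_Partition(new_nodes_dict, partition):
--     new_partition = defaultdict(list)
--     for node,group_id in partition.items():
--         new_partition[group_id].append(node)
--
--     for old_group_id, new_group_id in new_nodes_dict.items():
--         for old_group in new_partition[old_group_id]:
--             partition[old_group] = new_group_id
--     return partition
-- ===== SOURCE B (Python) =====
-- def new_Partition(new_nodes_dict, partition):
--     # Single dict comprehension: map each node's group id through the
--     # relabelling (identity where unmapped).  Note: unlike A, this builds a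
--     # fresh dict instead of mutating `partition` in place; the RETURN VALUE
--     # is identical.
--     return {node: new_nodes_dict.get(group_id, group_id)
--             for node, group_id in partition.items()}
-- ===== Notes on version B (the rewrite author's own statement) =====
-- stated objective: simpler
-- what changed: Drops A's inverse group->nodes index and its in-place relabelling loop: B is a single dict comprehension mapping each node's group id through new_nodes_dict.get(g, g) (return value identical; B returns a fresh dict instead of mutating partition in place).
import Mathlib
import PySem

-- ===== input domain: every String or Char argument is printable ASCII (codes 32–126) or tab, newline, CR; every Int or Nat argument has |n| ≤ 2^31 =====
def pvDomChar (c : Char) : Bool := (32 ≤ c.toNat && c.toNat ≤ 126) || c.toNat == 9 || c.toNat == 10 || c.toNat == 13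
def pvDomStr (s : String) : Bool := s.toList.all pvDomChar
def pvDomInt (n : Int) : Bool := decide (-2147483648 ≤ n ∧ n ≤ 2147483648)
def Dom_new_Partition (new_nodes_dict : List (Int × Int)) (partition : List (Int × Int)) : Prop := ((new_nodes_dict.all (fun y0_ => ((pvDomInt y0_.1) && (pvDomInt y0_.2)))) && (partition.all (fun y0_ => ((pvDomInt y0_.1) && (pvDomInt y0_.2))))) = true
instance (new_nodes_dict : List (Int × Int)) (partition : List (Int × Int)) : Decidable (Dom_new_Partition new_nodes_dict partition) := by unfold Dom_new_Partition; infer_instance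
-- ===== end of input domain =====

-- B replaces A's build-inverse-index-then-relabel two-phase loop by a single map of each
-- node's group id through the relabelling dict (simpler; equivalence is about the RETURN
-- value only: Python A mutates `partition` in place, B builds a fresh dict).


-- ===== PORT A =====
-- Literal transliteration of A: group nodes by their group id into the defaultdict
-- `np` (first loop), then for every (old_group_id, new_group_id) mapping overwrite
-- partition[node] for each node of that group (second loop); return partition.
def new_Partition (new_nodes_dict : List (Int × Int)) (partition : List (Int × Int)) : List (Int × Int) :=
  let part := PySem.Dict.ofList partition
  let nnd := PySem.Dict.ofList new_nodes_dict
  let np : PySem.Dict Int (List Int) :=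
    part.items.foldl (fun np kv => np.modify kv.2 [] (fun l => l ++ [kv.1])) PySem.Dict.empty
  let part2 := nnd.items.foldl (fun d kv =>
    (np.getD kv.1 []).foldl (fun d node => d.insert node kv.2) d) part
  part2.items

-- ===== PORT B =====
-- Literal transliteration of B: one dict comprehension over partition.items(),
-- each value mapped through new_nodes_dict.get(g, g).
def new_Partition_alt (new_nodes_dict : List (Int × Int)) (partition : List (Int × Int)) : List (Int × Int) :=
  let nnd := PySem.Dict.ofList new_nodes_dict
  (PySem.Dict.ofList ((PySem.Dict.ofList partition).items.map
      (fun kv => (kv.1, nnd.getD kv.2 kv.2)))).items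

-- ===== PRECONDITION & SPEC =====
def Spec_new_Partition (new_nodes_dict : List (Int × Int)) (partition : List (Int × Int)) (out : List (Int × Int)) : Prop := out = new_Partition_alt new_nodes_dict partition
instance (new_nodes_dict : List (Int × Int)) (partition : List (Int × Int)) (out : List (Int × Int)) : Decidable (Spec_new_Partition new_nodes_dict partition out) := by unfold Spec_new_Partition; infer_instance

-- ===== CLAIM (what is proved, stated in full; the proofs are below) =====
def Claim_equal_new_Partition : Prop := ∀ (new_nodes_dict : List (Int × Int)) (partition : List (Int × Int)), Dom_new_Partition new_nodes_dict partition → Spec_new_Partition new_nodes_dict partition (new_Partition new_nodes_dict partition)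

-- ===== LEMMAS AND PROOFS =====

-- ofList of a list whose keys are already distinct is that list.
theorem pv_ofList_items_of_nodup (l : List (Int × Int)) (h : (l.map Prod.fst).Nodup) :
    (PySem.Dict.ofList l).items = l := by
  have := PySem.Dict.items_foldl_insert_fresh l Prod.fst Prod.snd PySem.Dict.empty
    (fun a _ => rfl) h
  simpa [PySem.Dict.ofList, PySem.Dict.update] using this

-- lookup after the inner relabelling loop `for node in l: d[node] = v`.
theorem pv_get?_foldl_insert_const (l : List Int) (v : Int) (d : PySem.Dict Int Int) (k : Int) :
    (l.foldl (fun d n => d.insert n v) d).get? k = if k ∈ l then some v else d.get? k := by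
  induction l generalizing d with
  | nil => simp
  | cons n t ih =>
    simp only [List.foldl_cons, ih, PySem.Dict.get?_insert, List.mem_cons]
    by_cases hkt : k ∈ t <;> by_cases hkn : k = n <;> simp [hkt, hkn]

-- the inner loop only overwrites existing keys, so the key list is unchanged.
theorem pv_keys_foldl_insert_const (l : List Int) (v : Int) (d : PySem.Dict Int Int)
    (hsub : ∀ n ∈ l, n ∈ d.keys) :
    (l.foldl (fun d n => d.insert n v) d).keys = d.keys := by
  have h := PySem.Dict.keys_foldl_insert l (fun _ _ => v) d
  rw [h, PySem.Set.update_eq_append_filter]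
  have hnil : List.filter (fun y => !PySem.Set.contains d.keys y) (PySem.Set.ofList l) = [] := by
    rw [List.filter_eq_nil_iff]
    intro y hy
    have hyl : y ∈ l := (PySem.Set.mem_ofList l y).mp hy
    simp [PySem.Set.contains]
    exact hsub y hyl
  rw [hnil, List.append_nil]

-- the nodes of group g, in partition order (what np[g] holds after the first loop).
def pvGroup (pd : PySem.Dict Int Int) (g : Int) : List Int :=
  (pd.items.filter (fun kv => kv.2 == g)).map Prod.fst

theorem pv_np_getD (pd : PySem.Dict Int Int) (g : Int) :
    (pd.items.foldl (fun np kv => np.modify kv.2 [] (fun l => l ++ [kv.1]))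
      (PySem.Dict.empty : PySem.Dict Int (List Int))).getD g []
      = pvGroup pd g := by
  have hmap : pd.items.foldl (fun np kv => np.modify kv.2 [] (fun l => l ++ [kv.1]))
      (PySem.Dict.empty : PySem.Dict Int (List Int))
      = (pd.items.map (fun kv => (kv.2, kv.1))).foldl
          (fun np p => np.modify p.1 [] (fun l => l ++ [p.2])) PySem.Dict.empty := by
    rw [List.foldl_map]
  rw [hmap, PySem.Dict.getD_foldl_modify_append]
  simp [pvGroup, List.filter_map, Function.comp_def, List.map_map]

theorem pv_mem_group_iff (pd : PySem.Dict Int Int) (hnd : pd.keys.Nodup) (g k : Int) :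
    k ∈ pvGroup pd g ↔ pd.get? k = some g := by
  rw [PySem.Dict.get?_eq_some_iff_mem_items pd k g hnd]
  simp only [pvGroup, List.mem_map, List.mem_filter, beq_iff_eq]
  constructor
  · rintro ⟨⟨a, b⟩, ⟨hm, hb⟩, hk⟩
    simp_all
  · intro hm
    exact ⟨(k, g), ⟨hm, rfl⟩, rfl⟩

-- lookup after A's second (double) loop, characterised by the first matching mapping.
theorem pv_foldA_get? (pd : PySem.Dict Int Int) (hnd : pd.keys.Nodup)
    (M : List (Int × Int)) (d : PySem.Dict Int Int) (k : Int)
    (hM : (M.map Prod.fst).Nodup) :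
    (M.foldl (fun d kv => (pvGroup pd kv.1).foldl (fun d n => d.insert n kv.2) d) d).get? k
      = match M.find? (fun kv => pd.get? k == some kv.1) with
        | some kv => some kv.2
        | none => d.get? k := by
  induction M generalizing d with
  | nil => simp
  | cons kv M' ih =>
    simp only [List.map_cons, List.nodup_cons] at hM
    obtain ⟨hnotin, hM'⟩ := hM
    simp only [List.foldl_cons]
    rw [ih _ hM']
    by_cases hp : pd.get? k = some kv.1
    · have hfind : M'.find? (fun kv => pd.get? k == some kv.1) = none := by
        rw [List.find?_eq_none]
        intro x hx
        simp only [beq_iff_eq, hp, Option.some.injEq]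
        intro hcontra
        exact hnotin (List.mem_map.mpr ⟨x, hx, hcontra.symm⟩)
      rw [List.find?_cons_of_pos (by simp [hp]), hfind,
        pv_get?_foldl_insert_const]
      simp [(pv_mem_group_iff pd hnd kv.1 k).mpr hp]
    · rw [List.find?_cons_of_neg (by simp [hp])]
      have hk : k ∉ pvGroup pd kv.1 := fun h => hp ((pv_mem_group_iff pd hnd kv.1 k).mp h)
      cases hfind : M'.find? (fun kv => pd.get? k == some kv.1) with
      | some _ => rfl
      | none => rw [pv_get?_foldl_insert_const]; simp [hk]

-- keys are preserved through A's second loop (every inserted key is a key of pd).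
theorem pv_foldA_keys (pd : PySem.Dict Int Int) (M : List (Int × Int))
    (d : PySem.Dict Int Int) (hkeys : d.keys = pd.keys) :
    (M.foldl (fun d kv => (pvGroup pd kv.1).foldl (fun d n => d.insert n kv.2) d) d).keys
      = pd.keys := by
  induction M generalizing d with
  | nil => simpa using hkeys
  | cons kv M' ih =>
    simp only [List.foldl_cons]
    apply ih
    rw [pv_keys_foldl_insert_const _ _ _ ?_, hkeys]
    intro n hn
    rw [hkeys]
    simp only [pvGroup, List.mem_map, List.mem_filter] at hn
    obtain ⟨p, ⟨hp, _⟩, hpk⟩ := hn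
    exact hpk ▸ List.mem_map.mpr ⟨p, hp, rfl⟩

-- ===== VERDICT (by name: the statement is the Claim_ definition above) =====
theorem new_Partition_spec : Claim_equal_new_Partition := by
  intro new_nodes_dict partition _
  unfold Spec_new_Partition new_Partition new_Partition_alt
  set pd := PySem.Dict.ofList partition with hpd
  set md := PySem.Dict.ofList new_nodes_dict with hmd
  have hndp : pd.keys.Nodup := PySem.Dict.nodup_keys_ofList partition
  have hndm : md.keys.Nodup := PySem.Dict.nodup_keys_ofList new_nodes_dict
  simp only
  -- the defaultdict lookups in A's second loop are pvGroup
  have hnp : ∀ g, (pd.items.foldl (fun np kv => np.modify kv.2 [] (fun l => l ++ [kv.1]))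
      (PySem.Dict.empty : PySem.Dict Int (List Int))).getD g [] = pvGroup pd g :=
    pv_np_getD pd
  have hfold : (md.items.foldl (fun d kv =>
      ((pd.items.foldl (fun np kv => np.modify kv.2 [] (fun l => l ++ [kv.1]))
        (PySem.Dict.empty : PySem.Dict Int (List Int))).getD kv.1 []).foldl
        (fun d node => d.insert node kv.2) d) pd)
      = (md.items.foldl (fun d kv =>
          (pvGroup pd kv.1).foldl (fun d node => d.insert node kv.2) d) pd) := by
    apply PySem.List.foldl_congr_mem
    intro d kv _
    rw [hnp]
  rw [hfold]
  set resA := md.items.foldl (fun d kv =>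
    (pvGroup pd kv.1).foldl (fun d node => d.insert node kv.2) d) pd with hresA
  -- B's dict comprehension keeps pd's (distinct) keys
  have hBkeys : ((pd.items.map (fun kv => (kv.1, md.getD kv.2 kv.2))).map Prod.fst).Nodup := by
    simpa [List.map_map, Function.comp_def, PySem.Dict.keys] using hndp
  rw [pv_ofList_items_of_nodup _ hBkeys]
  -- A's result keys are pd's keys
  have hAkeys : resA.keys = pd.keys := pv_foldA_keys pd md.items pd rfl
  have hAnd : resA.keys.Nodup := hAkeys ▸ hndp
  rw [PySem.Dict.items_eq_map_keys resA hAnd 0, hAkeys,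
    PySem.Dict.items_eq_map_keys pd hndp 0, List.map_map]
  apply List.map_congr_left
  intro k hk
  simp only [Function.comp_def]
  -- k is a key of pd, so pd.get? k = some g for some g
  obtain ⟨g, hg⟩ : ∃ g, pd.get? k = some g := by
    cases h : pd.get? k with
    | some g => exact ⟨g, rfl⟩
    | none => exact absurd hk ((PySem.Dict.get?_eq_none_iff_not_mem_keys pd k).mp h)
  have hgetD : pd.getD k 0 = g := PySem.Dict.getD_of_get?_eq_some pd 0 hg
  have hA := pv_foldA_get? pd hndp md.items pd k hndm
  have hfindeq : (fun kv : Int × Int => pd.get? k == some kv.1)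
      = (fun p : Int × Int => p.1 == g) := by
    funext x
    rw [hg]
    rcases eq_or_ne x.1 g with h | h
    · simp [h]
    · simp [h, Ne.symm h]
  rw [hfindeq] at hA
  rw [hgetD]
  cases hfind : md.items.find? (fun p => p.1 == g) with
  | some kv =>
    simp only [hfind] at hA
    have h1 : resA.getD k 0 = kv.2 := PySem.Dict.getD_of_get?_eq_some resA 0 hA
    have h2 : md.get? g = some kv.2 := by simp [PySem.Dict.get?, hfind]
    rw [h1, PySem.Dict.getD_of_get?_eq_some md g h2]
  | none =>
    simp only [hfind] at hA
    have h1 : resA.getD k 0 = g := PySem.Dict.getD_of_get?_eq_some resA 0 (hA.trans hg)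
    have h2 : md.get? g = none := by simp [PySem.Dict.get?, hfind]
    have h3 : md.getD g g = g := by simp [PySem.Dict.getD, h2]
    rw [h1, h3]
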